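-- pv_equiv track=rewrite | github.com/richbon75/practice | advent_of_code_2015/a25_let_it_snow.py | code_at
-- ===== SOURCE A (Python) =====
-- def code_at(r,c):
--     """Given a row and column, what number code is there?
--     ex: code_at(1,1) = 1, code_at(2,1) = 2, code_at(1,2) = 3
--     """
--     code = 1
--     inc = 1
--     while r > 1:
--         code += inc
--         inc += 1
--         r -= 1
--     inc += 1
--     while c > 1:
--         code += inc
--         inc += 1
--         c -= 1
--     return code
-- ===== SOURCE B (Python) =====
-- def code_at(r, c):
--     """Closed-form: triangular-number arithmetic instead of the two counting loops."""
--     r = max(r, 1)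
--     c = max(c, 1)
--     return 1 + r * (r - 1) // 2 + (c - 1) * (r + 1) + (c - 1) * (c - 2) // 2
-- ===== Notes on version B (the rewrite author's own statement) =====
-- stated objective: faster
-- what changed: Replaced the two counting while-loops by a closed-form triangular-number formula (with max(.,1) clamping matching the loops' skip on non-positive input).
import Mathlib
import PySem

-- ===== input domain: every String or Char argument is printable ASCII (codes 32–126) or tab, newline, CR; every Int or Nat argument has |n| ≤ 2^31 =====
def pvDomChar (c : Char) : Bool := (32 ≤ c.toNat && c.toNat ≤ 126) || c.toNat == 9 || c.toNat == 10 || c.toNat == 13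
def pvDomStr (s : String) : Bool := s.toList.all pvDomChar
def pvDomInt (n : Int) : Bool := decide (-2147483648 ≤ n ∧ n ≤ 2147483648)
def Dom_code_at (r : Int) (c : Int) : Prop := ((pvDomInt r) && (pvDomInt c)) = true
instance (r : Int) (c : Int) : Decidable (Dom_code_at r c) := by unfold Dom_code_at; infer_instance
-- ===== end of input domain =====

-- B replaces A's two counting loops by a closed-form triangular-number formula (O(1) instead of O(r+c)).

-- ===== PORT A =====
-- Both of A's while-loops have the identical body (code += inc; inc += 1; k -= 1),
-- so one helper transliterates them; it is called once for each loop.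
def codeLoop (code : Int) (inc : Int) (k : Int) : Int × Int :=
  if k > 1 then codeLoop (code + inc) (inc + 1) (k - 1) else (code, inc)
termination_by (k - 1).toNat
decreasing_by omega

def code_at (r : Int) (c : Int) : Int :=
  let p := codeLoop 1 1 r
  (codeLoop p.1 (p.2 + 1) c).1

-- ===== PORT B =====
def code_at_alt (r : Int) (c : Int) : Int :=
  let r' := max r 1
  let c' := max c 1
  1 + PySem.Int.floordiv (r' * (r' - 1)) 2 + (c' - 1) * (r' + 1)
    + PySem.Int.floordiv ((c' - 1) * (c' - 2)) 2

-- ===== PRECONDITION & SPEC =====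
def Spec_code_at (r : Int) (c : Int) (out : Int) : Prop := out = code_at_alt r c
instance (r : Int) (c : Int) (out : Int) : Decidable (Spec_code_at r c out) := by unfold Spec_code_at; infer_instance

-- ===== CLAIM (what is proved, stated in full; the proofs are below) =====
def Claim_equal_code_at : Prop := ∀ (r : Int) (c : Int), Dom_code_at r c → Spec_code_at r c (code_at r c)

-- ===== LEMMAS AND PROOFS =====

def tri : Nat → Nat
  | 0 => 0
  | n + 1 => tri n + n

theorem two_tri (n : Nat) : (2 * tri n : Int) = (n : Int) * ((n : Int) - 1) := by
  induction n with
  | zero => simp [tri]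
  | succ k ih =>
    simp only [tri]
    push_cast
    push_cast at ih
    linear_combination ih

theorem codeLoop_eq (n : Nat) : ∀ (code inc : Int),
    codeLoop code inc ((n : Int) + 1) = (code + n * inc + tri n, inc + n) := by
  induction n with
  | zero => intro code inc; rw [codeLoop]; simp [tri]
  | succ k ih =>
    intro code inc
    rw [codeLoop]
    push_cast
    have h : ((k : Int) + 1 + 1 > 1) := by omega
    rw [if_pos h]
    have h2 : ((k : Int) + 1 + 1 - 1) = (k : Int) + 1 := by ring
    rw [h2, ih]
    simp only [tri]
    push_cast
    rw [Prod.mk.injEq]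
    constructor <;> ring

theorem codeLoop_closed (k code inc : Int) :
    codeLoop code inc k = (code + ((k - 1).toNat : Int) * inc + tri (k - 1).toNat,
                           inc + ((k - 1).toNat : Int)) := by
  rcases (by omega : k ≤ 1 ∨ 1 < k) with h | h
  · rw [codeLoop]
    have : ¬ k > 1 := by omega
    simp [this, Int.toNat_of_nonpos (by omega : k - 1 ≤ 0), tri]
  · have hk : k = ((k - 1).toNat : Int) + 1 := by omega
    conv_lhs => rw [hk]
    rw [codeLoop_eq]

-- ===== VERDICT (by name: the statement is the Claim_ definition above) =====
theorem code_at_spec : Claim_equal_code_at := by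
  intro r c _
  unfold Spec_code_at code_at code_at_alt
  set a : Nat := (r - 1).toNat with ha
  set b : Nat := (c - 1).toNat with hb
  rw [codeLoop_closed]
  dsimp only
  rw [codeLoop_closed]
  dsimp only
  have hr : max r 1 = (a : Int) + 1 := by omega
  have hc : max c 1 = (b : Int) + 1 := by omega
  simp only [hr, hc]
  have e1 : ((a : Int) + 1) * ((a : Int) + 1 - 1) = 2 * ((a : Int) + tri a) := by
    linear_combination -two_tri a
  have e2 : ((b : Int) + 1 - 1) * ((b : Int) + 1 - 2) = 2 * ((tri b : Int)) := by
    linear_combination -two_tri b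
  rw [e1, e2, PySem.Int.floordiv_eq_ediv_of_pos (by norm_num),
      PySem.Int.floordiv_eq_ediv_of_pos (by norm_num),
      Int.mul_ediv_cancel_left _ (by norm_num : (2:Int) ≠ 0),
      Int.mul_ediv_cancel_left _ (by norm_num : (2:Int) ≠ 0)]
  ring
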